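-- pv_equiv track=rewrite | github.com/LennyGonz/LeetCode-Questions | Daily-Coding-Problem/problem-322.py | jump_path
-- ===== SOURCE A (Python) =====
-- def make_path(nums, is_negative):
--   path = [nums[0]]
--
--   for i in nums[1:]:
--     path.append(path[-1] + i)
--
--   if is_negative:
--     return [-1 * i for i in path]
--   else:
--     return path
--
-- def jump_path(n):
--   is_negative = False
--
--   if n < 0:
--     n = -n
--     is_negative = True
--
--   k = total = 0
--   while total < n or (total > n and (total - n) % 2 != 0):
--     k += 1
--     total += k
--
--   if total == n:
--     return make_path(range(k + 1), is_negative)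
--
--   nums = list(range(k + 1))
--   index = (total - n) // 2
--
--   return make_path(nums[:index] + [-index] + nums[index + 1:], is_negative)
-- ===== SOURCE B (Python) =====
-- def jump_path(n):
--     m = abs(n)
--     k = 0
--     while k * (k + 1) // 2 < m or (k * (k + 1) // 2 - m) % 2 != 0:
--         k += 1
--     rem = (k * (k + 1) // 2 - m) // 2
--     flips = set()
--     for i in range(k, 0, -1):
--         if i <= rem:
--             flips.add(i)
--             rem -= i
--     path = [0]
--     cur = 0
--     for i in range(1, k + 1):
--         cur = cur - i if i in flips else cur + i
--         path.append(cur)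
--     if n < 0:
--         return [-x for x in path]
--     return path
-- ===== Notes on version B (the rewrite author's own statement) =====
-- stated objective: alternative
-- what changed: Replaces make_path's slice-splice-and-cumulative-sum construction by a greedy descending choice of which steps to negate followed by one forward prefix-sum pass, which also fixes A's broken output when the flip index exceeds k.
-- intended difference: On inputs where (T(k)-|n|)/2 > k for the minimal k with T(k)>=|n| and T(k)-|n| even (e.g. n=12), A splices -index past the end of the list and returns a length-k+2 path that does not end at n (A(12) ends at 20); B greedily negates a set of steps summing to (T(k)-|n|)/2 and returns a valid k-step path ending at n, which is the intended value. — e.g. on jump_path(12): A returns [0, 1, 3, 6, 10, 15, 21, 28, 20], B returns [0, -1, 1, 4, 8, 13, 19, 12]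
import Mathlib
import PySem

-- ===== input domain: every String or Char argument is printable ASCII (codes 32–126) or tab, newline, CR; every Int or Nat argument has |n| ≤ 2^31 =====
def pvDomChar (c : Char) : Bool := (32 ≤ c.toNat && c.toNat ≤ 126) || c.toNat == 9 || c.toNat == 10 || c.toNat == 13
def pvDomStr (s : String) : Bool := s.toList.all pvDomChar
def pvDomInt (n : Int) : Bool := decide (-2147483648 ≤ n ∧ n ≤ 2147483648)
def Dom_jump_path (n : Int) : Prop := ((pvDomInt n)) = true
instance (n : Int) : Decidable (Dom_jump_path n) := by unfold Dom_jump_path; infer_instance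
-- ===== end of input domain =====

-- B replaces A's slice-splice + cumulative-sum path construction by a greedy choice of the
-- steps to negate followed by one prefix-sum pass; on inputs where A's single flip index
-- exceeds k (D_jump_path) A returns a broken path and B returns a correct one.

-- ===== PORT A =====
-- while total < n or (total > n and (total - n) % 2 != 0): k += 1; total += k
-- (fuel bounds the recursion only; the proof shows it is never exhausted)
def jumpLoopA (n : Int) : Nat → Int → Int → Int × Int
  | 0, k, total => (k, total)
  | fuel+1, k, total =>
    if total < n ∨ (total > n ∧ PySem.Int.mod (total - n) 2 ≠ 0) then
      jumpLoopA n fuel (k+1) (total + (k+1))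
    else (k, total)

-- path = [nums[0]]; for i in nums[1:]: path.append(path[-1] + i)
-- (append-loop kept as a fold with a reversed accumulator, reversed at the end;
--  nums = [] is unreachable from jump_path, where Python would raise IndexError)
def make_path (nums : List Int) (is_negative : Bool) : List Int :=
  match nums with
  | [] => []
  | x :: rest =>
    let revpath := rest.foldl (fun acc i => (acc.headD 0 + i) :: acc) [x]
    let path := revpath.reverse
    if is_negative then path.map (fun i => -1 * i) else path

def jump_path (n : Int) : List Int :=
  let is_negative := n < 0
  let n' := if n < 0 then -n else n
  let kt := jumpLoopA n' (n'.toNat + 3) 0 0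
  let k := kt.1
  let total := kt.2
  if total = n' then
    make_path (PySem.List.pyRange 0 (k+1) 1) is_negative
  else
    let nums := PySem.List.pyRange 0 (k+1) 1
    let index := PySem.Int.floordiv (total - n') 2
    make_path (PySem.List.slice nums none (some index) ++ [-index] ++
               PySem.List.slice nums (some (index+1)) none) is_negative

-- ===== PORT B =====
-- while k*(k+1)//2 < m or (k*(k+1)//2 - m) % 2 != 0: k += 1   (same fuel guard)
def jumpLoopB (m : Int) : Nat → Int → Int
  | 0, k => k
  | fuel+1, k =>
    if PySem.Int.floordiv (k*(k+1)) 2 < m ∨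
       PySem.Int.mod (PySem.Int.floordiv (k*(k+1)) 2 - m) 2 ≠ 0 then
      jumpLoopB m fuel (k+1)
    else k

def jump_path_alt (n : Int) : List Int :=
  let m := if n < 0 then -n else n   -- abs(n)
  let k := jumpLoopB m (m.toNat + 3) 0
  -- greedy descending choice of the steps to flip
  let fr := (PySem.List.pyRange k 0 (-1)).foldl
      (fun (st : PySem.Set Int × Int) i =>
        if i ≤ st.2 then (PySem.Set.add st.1 i, st.2 - i) else st)
      (PySem.Set.empty, PySem.Int.floordiv (PySem.Int.floordiv (k*(k+1)) 2 - m) 2)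
  let flips := fr.1
  -- forward prefix-sum pass (append-loop as fold with reversed accumulator)
  let pc := (PySem.List.pyRange 1 (k+1) 1).foldl
      (fun (st : List Int × Int) i =>
        let cur := if PySem.Set.contains flips i then st.2 - i else st.2 + i
        (cur :: st.1, cur))
      ([0], 0)
  let path := pc.1.reverse
  if n < 0 then path.map (fun x => -x) else path

-- ===== PRECONDITION & SPEC =====
-- On inputs where the flip index (T(k)-|n|)/2 exceeds k (k minimal with T(k) ≥ |n| and
-- T(k)-|n| even, T(k)=k(k+1)/2), A splices -index past the end of the list and returns a
-- length-(k+2) path that does not end at n; B returns a valid k-step path ending at n,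
-- which is the intended value.
-- k below is the first triangular crossing (k(k-1) < 2|n| ≤ k(k+1)); A is wrong exactly when
-- it is odd and T(k)-|n| is odd and ≥ 3; on Dom (|n| ≤ 2^31) that k is < 65538
def D_jump_path (n : Int) : Prop :=
  ∃ k < 65538, 2 * n.natAbs ≤ k * (k+1) ∧ k * (k-1) < 2 * n.natAbs ∧ k % 2 = 1 ∧
    (k * (k+1) - 2 * n.natAbs) % 4 = 2 ∧ 6 ≤ k * (k+1) - 2 * n.natAbs
instance (n : Int) : Decidable (D_jump_path n) := by unfold D_jump_path; infer_instance

def Spec_jump_path (n : Int) (out : List Int) : Prop := ¬ D_jump_path n → out = jump_path_alt n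
instance (n : Int) (out : List Int) : Decidable (Spec_jump_path n out) := by
  unfold Spec_jump_path; infer_instance

def pvDiffWitness_jump_path : Int := 12
def pvDiffWitnessOut_jump_path : (List Int) × (List Int) :=
  ([0, 1, 3, 6, 10, 15, 21, 28, 20], [0, -1, 1, 4, 8, 13, 19, 12])

-- ===== CLAIM (what is proved, stated in full; the proofs are below) =====
def Claim_unchanged_jump_path : Prop :=
  ∀ (n : Int), Dom_jump_path n → Spec_jump_path n (jump_path n)
def Claim_changed_jump_path : Prop :=
  Dom_jump_path (pvDiffWitness_jump_path) ∧ D_jump_path (pvDiffWitness_jump_path) ∧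
  jump_path (pvDiffWitness_jump_path) = pvDiffWitnessOut_jump_path.1 ∧
  jump_path_alt (pvDiffWitness_jump_path) = pvDiffWitnessOut_jump_path.2 ∧
  pvDiffWitnessOut_jump_path.1 ≠ pvDiffWitnessOut_jump_path.2
def Claim_exact_jump_path : Prop :=
  ∀ (n : Int), Dom_jump_path n → D_jump_path n → jump_path n ≠ jump_path_alt n

-- ===== LEMMAS AND PROOFS =====

def Tri (k : Int) : Int := PySem.Int.floordiv (k*(k+1)) 2

theorem tri_two_mul (k : Int) : 2 * Tri k = k * (k + 1) := by
  obtain ⟨t, ht⟩ := Int.even_mul_succ_self k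
  unfold Tri
  rw [PySem.Int.floordiv_eq_ediv_of_pos (by omega)]
  omega

theorem tri_succ (k : Int) : Tri (k+1) = Tri k + (k+1) := by
  have h1 := tri_two_mul k
  have h2 := tri_two_mul (k+1)
  nlinarith

theorem tri_ge_self (k : Int) (hk : 0 ≤ k) : k ≤ Tri k := by
  have h1 := tri_two_mul k
  rcases eq_or_lt_of_le hk with h | h
  · subst h
    decide
  · nlinarith [mul_nonneg (by omega : (0:Int) ≤ k) (by omega : (0:Int) ≤ k - 1)]

def Good (m k : Int) : Prop := m ≤ Tri k ∧ PySem.Int.mod (Tri k - m) 2 = 0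

theorem good_iff_emod (m k : Int) :
    Good m k ↔ (m ≤ Tri k ∧ (Tri k - m) % 2 = 0) := by
  unfold Good
  rw [PySem.Int.mod_eq_emod_of_pos (by omega)]

theorem condB_iff (m k : Int) :
    (PySem.Int.floordiv (k*(k+1)) 2 < m ∨
     PySem.Int.mod (PySem.Int.floordiv (k*(k+1)) 2 - m) 2 ≠ 0) ↔ ¬ Good m k := by
  unfold Good Tri
  rw [PySem.Int.mod_eq_emod_of_pos (by omega)]
  omega

theorem condA_iff (m k : Int) :
    ((Tri k < m ∨ (Tri k > m ∧ PySem.Int.mod (Tri k - m) 2 ≠ 0))) ↔ ¬ Good m k := by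
  unfold Good Tri
  rw [PySem.Int.mod_eq_emod_of_pos (by omega)]
  omega

theorem loopAB (m : Int) : ∀ (fuel : Nat) (k : Int),
    jumpLoopA m fuel k (Tri k) = (jumpLoopB m fuel k, Tri (jumpLoopB m fuel k)) := by
  intro fuel
  induction fuel with
  | zero => intro k; rfl
  | succ f ih =>
    intro k
    show (if Tri k < m ∨ (Tri k > m ∧ PySem.Int.mod (Tri k - m) 2 ≠ 0) then
            jumpLoopA m f (k+1) (Tri k + (k+1)) else (k, Tri k)) = _
    rw [jumpLoopB]
    by_cases hg : Good m k
    · rw [if_neg (fun hc => (condA_iff m k).mp hc hg),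
          if_neg (fun hc => (condB_iff m k).mp hc hg)]
    · rw [if_pos ((condA_iff m k).mpr hg), if_pos ((condB_iff m k).mpr hg), ← tri_succ, ih]

theorem exists_good (m : Int) (hm : 0 ≤ m) :
    ∃ j : Nat, Good m (j:Int) ∧ (j:Int) ≤ m + 2 := by
  have hcast : ((m.toNat : Int)) = m := Int.toNat_of_nonneg hm
  have hle := tri_ge_self m hm
  have hs1 := tri_succ m
  have hs2 := tri_succ (m+1)
  have e : m + 1 + 1 = m + 2 := by ring
  rw [e] at hs2
  by_cases hp : PySem.Int.mod (Tri m - m) 2 = 0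
  · exact ⟨m.toNat, by unfold Good; rw [hcast]; exact ⟨hle, hp⟩, by omega⟩
  · refine ⟨m.toNat + 2, ?_, by push_cast; omega⟩
    unfold Good
    push_cast [hcast]
    rw [PySem.Int.mod_eq_emod_of_pos (by omega)]
    rw [PySem.Int.mod_eq_emod_of_pos (by omega)] at hp
    constructor
    · omega
    · omega

theorem loopB_run (m : Int) (K : Nat) (hK : Good m (K:Int))
    (hmin : ∀ j : Nat, j < K → ¬ Good m (j:Int)) :
    ∀ (fuel k : Nat), k ≤ K → K ≤ k + fuel → jumpLoopB m fuel (k:Int) = (K:Int) := by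
  intro fuel
  induction fuel with
  | zero =>
    intro k h1 h2
    have hkK : k = K := by omega
    subst hkK; rfl
  | succ f ih =>
    intro k h1 h2
    rw [jumpLoopB]
    by_cases he : k = K
    · subst he
      rw [if_neg (fun hc => (condB_iff m (k:Int)).mp hc hK)]
    · have hk : k < K := by omega
      rw [if_pos ((condB_iff m (k:Int)).mpr (hmin k hk))]
      have : ((k:Int) + 1) = ((k+1 : Nat) : Int) := by push_cast; ring
      rw [this]
      exact ih (k+1) (by omega) (by omega)

theorem loop_result (m : Int) (hm : 0 ≤ m) :
    ∃ K : Nat, jumpLoopB m (m.toNat + 3) 0 = (K:Int) ∧ Good m (K:Int) ∧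
      (∀ j : Nat, j < K → ¬ Good m (j:Int)) ∧ (K:Int) ≤ m + 2 := by
  haveI : DecidablePred (fun j : Nat => Good m (j:Int)) := fun j =>
    decidable_of_iff _ (good_iff_emod m (j:Int)).symm
  obtain ⟨j0, hj0, hj0le⟩ := exists_good m hm
  have hex : ∃ j : Nat, Good m (j:Int) := ⟨j0, hj0⟩
  have hfle : Nat.find hex ≤ j0 := Nat.find_le hj0
  have hcast : ((m.toNat : Int)) = m := Int.toNat_of_nonneg hm
  refine ⟨Nat.find hex, ?_, Nat.find_spec hex, fun j hj => Nat.find_min hex hj, by omega⟩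
  have h0 : jumpLoopB m (m.toNat + 3) ((0:Nat):Int) = ((Nat.find hex : Nat):Int) :=
    loopB_run m (Nat.find hex) (Nat.find_spec hex) (fun j hj => Nat.find_min hex hj)
      (m.toNat + 3) 0 (by omega) (by omega)
  simpa using h0


theorem s_spec (m : Int) (K : Int) (hg : Good m K) :
    2 * PySem.Int.floordiv (Tri K - m) 2 = Tri K - m ∧ 0 ≤ PySem.Int.floordiv (Tri K - m) 2 := by
  obtain ⟨h1, h2⟩ := hg
  have h3 := PySem.Int.floordiv_mul_add_mod (Tri K - m) 2
  omega


theorem bad_iff (m : Int) (hm0 : 0 ≤ m) (hm31 : m ≤ 2147483648) (K : Nat)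
    (hg : Good m (K:Int)) (hmin : ∀ j : Nat, j < K → ¬ Good m (j:Int)) :
    (∃ k, k < 65538 ∧ 2 * m.toNat ≤ k * (k+1) ∧ k * (k-1) < 2 * m.toNat ∧ k % 2 = 1 ∧
        (k * (k+1) - 2 * m.toNat) % 4 = 2 ∧ 6 ≤ k * (k+1) - 2 * m.toNat)
      ↔ (K:Int) < PySem.Int.floordiv (Tri (K:Int) - m) 2 := by
  obtain ⟨hs2, hs0⟩ := s_spec m K hg
  have hcast : ((m.toNat : Int)) = m := Int.toNat_of_nonneg hm0
  obtain ⟨hgT, hgP⟩ := (good_iff_emod m (K:Int)).mp hg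
  constructor
  · rintro ⟨k1, hlt, hhi, hlo, hodd, h4, h6⟩
    have hk11 : 1 ≤ k1 := by omega
    have e1 : ((k1*(k1+1) : Nat) : Int) = 2 * Tri (k1:Int) := by
      have h := tri_two_mul (k1:Int)
      push_cast
      linarith
    have e2 : ((k1*(k1-1) : Nat) : Int) = 2 * Tri (k1:Int) - 2*(k1:Int) := by
      have h := tri_two_mul (k1:Int)
      push_cast [hk11]
      nlinarith
    have ht1 := tri_succ (k1:Int)
    have ht2 := tri_succ ((k1:Int)+1)
    have e : (k1:Int) + 1 + 1 = (k1:Int) + 2 := by ring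
    rw [e] at ht2
    have hg2 : Good m ((k1:Int)+2) := by
      rw [good_iff_emod]
      constructor
      · omega
      · omega
    have hjlt : ∀ j : Nat, j < k1 → ¬ Good m (j:Int) := by
      intro j hj
      rw [good_iff_emod]
      have hmul : j*(j+1) ≤ k1*(k1-1) := by
        calc j*(j+1) ≤ (k1-1)*k1 := Nat.mul_le_mul (by omega) (by omega)
          _ = k1*(k1-1) := Nat.mul_comm _ _
      have e3 : ((j*(j+1) : Nat) : Int) = 2 * Tri (j:Int) := by
        have h := tri_two_mul (j:Int)
        push_cast
        linarith
      rintro ⟨hTj, -⟩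
      omega
    have hKeq : K = k1 + 2 := by
      have hge : k1 ≤ K := by
        by_contra hK
        rw [not_le] at hK
        exact (hjlt K hK) hg
      have hle2 : K ≤ k1 + 2 := by
        by_contra hK
        rw [not_le] at hK
        exact hmin (k1+2) hK (by push_cast; exact hg2)
      have h0 : ¬ Good m ((k1:Int)) := by
        rw [good_iff_emod]
        rintro ⟨-, hpar⟩
        omega
      have h1 : ¬ Good m ((k1:Int)+1) := by
        rw [good_iff_emod]
        rintro ⟨-, hpar⟩
        omega
      have htri : K = k1 ∨ K = k1 + 1 ∨ K = k1 + 2 := by omega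
      rcases htri with h | h | h
      · subst h; exact absurd hg h0
      · subst h; push_cast at hg; exact absurd hg h1
      · exact h
    subst hKeq
    push_cast at hs2 hs0 ⊢
    omega
  · intro hKs
    have hK4 : 4 ≤ K := by
      by_contra h
      rw [not_le] at h
      interval_cases K
      · have hT : Tri ((0:Nat):Int) = 0 := by decide
        simp only [hT] at *
        omega
      · have hT : Tri ((1:Nat):Int) = 1 := by decide
        simp only [hT] at *
        omega
      · have hT : Tri ((2:Nat):Int) = 3 := by decide
        simp only [hT] at *
        omega
      · have hT : Tri ((3:Nat):Int) = 6 := by decide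
        simp only [hT] at *
        omega
    have ht1 : Tri ((K:Int)-1+1) = Tri ((K:Int)-1) + ((K:Int)-1+1) := tri_succ _
    have ht2 : Tri ((K:Int)-2+1) = Tri ((K:Int)-2) + ((K:Int)-2+1) := tri_succ _
    have ht3 : Tri ((K:Int)-3+1) = Tri ((K:Int)-3) + ((K:Int)-3+1) := tri_succ _
    have e1 : (K:Int)-1+1 = (K:Int) := by ring
    have e2 : (K:Int)-2+1 = (K:Int)-1 := by ring
    have e3 : (K:Int)-3+1 = (K:Int)-2 := by ring
    rw [e1] at ht1
    rw [e2] at ht2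
    rw [e3] at ht3
    have hng1 : ¬ Good m ((K:Int)-1) := by
      have h := hmin (K-1) (by omega)
      have ec : (((K-1 : Nat)) : Int) = (K:Int)-1 := by push_cast [show 1 ≤ K by omega]; ring
      rwa [ec] at h
    have hng2 : ¬ Good m ((K:Int)-2) := by
      have h := hmin (K-2) (by omega)
      have ec : (((K-2 : Nat)) : Int) = (K:Int)-2 := by push_cast [show 2 ≤ K by omega]; ring
      rwa [ec] at h
    have hng3 : ¬ Good m ((K:Int)-3) := by
      have h := hmin (K-3) (by omega)
      have ec : (((K-3 : Nat)) : Int) = (K:Int)-3 := by push_cast [show 3 ≤ K by omega]; ring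
      rwa [ec] at h
    rw [good_iff_emod, not_and_or] at hng1 hng2 hng3
    -- forced parities
    have hd1 : ((Tri ((K:Int)-1) - m) % 2 ≠ 0) := by
      rcases hng1 with h | h
      · omega
      · exact h
    have hd2 : ((Tri ((K:Int)-2) - m) % 2 ≠ 0) := by
      rcases hng2 with h | h
      · omega
      · exact h
    have hKodd : (K:Int) % 2 = 1 := by omega
    have hT3 : Tri ((K:Int)-3) < m := by
      rcases hng3 with h | h
      · omega
      · omega
    -- products for the witness K-2
    have ep1 : (((K-2)*(K-1) : Nat) : Int) = 2 * Tri ((K:Int)-2) := by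
      have h := tri_two_mul ((K:Int)-2)
      push_cast [show 2 ≤ K by omega, show 1 ≤ K by omega]
      nlinarith
    have ep2 : (((K-2)*(K-3) : Nat) : Int) = 2 * Tri ((K:Int)-3) := by
      have h := tri_two_mul ((K:Int)-3)
      push_cast [show 2 ≤ K by omega, show 3 ≤ K by omega]
      nlinarith
    have hb : K - 2 < 65538 := by
      by_contra hbig
      rw [not_lt] at hbig
      have hmul : (65538*65537 : Nat) ≤ (K-2)*(K-3) :=
        Nat.mul_le_mul (by omega) (by omega)
      have hmul' : ((65538*65537 : Nat) : Int) ≤ (((K-2)*(K-3) : Nat) : Int) := by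
        exact_mod_cast hmul
      rw [ep2] at hmul'
      norm_num at hmul'
      omega
    have eK1 : K - 2 + 1 = K - 1 := by omega
    have eK3 : K - 2 - 1 = K - 3 := by omega
    refine ⟨K - 2, hb, ?_, ?_, ?_, ?_, ?_⟩
    · rw [eK1]
      have hI : ((2*m.toNat : Nat) : Int) ≤ (((K-2)*(K-1) : Nat) : Int) := by
        rw [ep1]; omega
      exact_mod_cast hI
    · rw [eK3]
      have hI : (((K-2)*(K-3) : Nat) : Int) < ((2*m.toNat : Nat) : Int) := by
        rw [ep2]; omega
      exact_mod_cast hI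
    · omega
    · rw [eK1]
      omega
    · rw [eK1]
      omega

theorem greedy_fold (kN : Nat) : ∀ (F : PySem.Set Int) (rem : Int), 0 ≤ rem → rem ≤ (kN:Int) →
    (PySem.List.pyRange (kN:Int) 0 (-1)).foldl
      (fun (st : PySem.Set Int × Int) i =>
        if i ≤ st.2 then (PySem.Set.add st.1 i, st.2 - i) else st) (F, rem)
    = (if rem = 0 then F else PySem.Set.add F rem, 0) := by
  induction kN with
  | zero =>
    intro F rem h0 h1
    have hr : rem = 0 := by exact_mod_cast le_antisymm h1 h0
    rw [PySem.List.pyRange_neg_one_eq_nil (by norm_num)]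
    simp [hr]
  | succ t ih =>
    intro F rem h0 h1
    rw [PySem.List.pyRange_neg_one_cons (by push_cast; omega)]
    have e : ((t+1:Nat):Int) - 1 = (t:Int) := by push_cast; ring
    rw [e]
    simp only [List.foldl_cons]
    by_cases hc : ((t+1:Nat):Int) ≤ rem
    · have hrem : rem = ((t+1:Nat):Int) := le_antisymm h1 hc
      subst hrem
      rw [if_pos hc, sub_self,
          ih (PySem.Set.add F ((t+1:Nat):Int)) 0 le_rfl (by positivity)]
      rw [if_pos rfl, if_neg (by push_cast; omega)]
    · rw [if_neg hc]
      exact ih F rem h0 (by push_cast at hc ⊢; omega)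

theorem couple (flips : PySem.Set Int) :
    ∀ (ys : List Int) (rest : List Int) (cur : Int),
    ((ys.map (fun i => if PySem.Set.contains flips i then -i else i)).foldl
        (fun acc i => (acc.headD 0 + i) :: acc) (cur :: rest))
    = (ys.foldl (fun (st : List Int × Int) i =>
         ((if PySem.Set.contains flips i then st.2 - i else st.2 + i) :: st.1,
          if PySem.Set.contains flips i then st.2 - i else st.2 + i)) (cur :: rest, cur)).1 := by
  intro ys
  induction ys with
  | nil => intro rest cur; rfl
  | cons y ys ih =>
    intro rest cur
    simp only [List.map_cons, List.foldl_cons, List.headD_cons]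
    cases hc : PySem.Set.contains flips y <;> simp only [if_true, if_false, Bool.false_eq_true]
    · exact ih (cur :: rest) (cur + y)
    · rw [show cur + -y = cur - y by ring]
      exact ih (cur :: rest) (cur - y)

theorem nums_splice (K s : Int) (h1 : 1 ≤ s) (hsK : s ≤ K) :
    PySem.List.slice (PySem.List.pyRange 0 (K+1) 1) none (some s) ++ [-s] ++
    PySem.List.slice (PySem.List.pyRange 0 (K+1) 1) (some (s+1)) none
    = PySem.List.pyRange 0 s 1 ++ [-s] ++ PySem.List.pyRange (s+1) (K+1) 1 := by
  rw [PySem.List.slice_to _ (by omega), PySem.List.slice_from _ (by omega)]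
  have hsplit : PySem.List.pyRange 0 (K+1) 1
      = (PySem.List.pyRange 0 s 1 ++ PySem.List.pyRange s (s+1) 1) ++ PySem.List.pyRange (s+1) (K+1) 1 := by
    rw [List.append_assoc, ← PySem.List.pyRange_one_append s (s+1) (K+1) (by omega) (by omega),
        ← PySem.List.pyRange_one_append 0 s (K+1) (by omega) (by omega)]
  have hlen1 : (PySem.List.pyRange 0 s 1).length = s.toNat := by
    rw [PySem.List.length_pyRange_one]; omega
  have hlen2 : ((PySem.List.pyRange 0 s 1 ++ PySem.List.pyRange s (s+1) 1)).length = (s+1).toNat := by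
    rw [List.length_append, PySem.List.length_pyRange_one, PySem.List.length_pyRange_one]; omega
  congr 1
  · congr 1
    rw [hsplit, List.append_assoc, List.take_left' hlen1]
  · rw [hsplit, List.drop_left' hlen2]

theorem contains_empty (i : Int) :
    PySem.Set.contains (PySem.Set.empty : PySem.Set Int) i = false := by
  cases h : PySem.Set.contains (PySem.Set.empty : PySem.Set Int) i
  · rfl
  · exfalso
    have := (PySem.Set.contains_iff _ _).mp h
    simp [PySem.Set.empty] at this

theorem contains_single (sv i : Int) :
    PySem.Set.contains (PySem.Set.add PySem.Set.empty sv) i = true ↔ i = sv := by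
  rw [PySem.Set.contains_iff, PySem.Set.mem_add]
  simp [PySem.Set.empty]

theorem map_step_of_no_flip (flips : PySem.Set Int) (l : List Int)
    (h : ∀ x ∈ l, ¬ (PySem.Set.contains flips x = true)) :
    l.map (fun i => if PySem.Set.contains flips i then -i else i) = l := by
  induction l with
  | nil => rfl
  | cons x xs ih =>
    simp only [List.map_cons, if_neg (h x List.mem_cons_self)]
    rw [ih (fun y hy => h y (List.mem_cons_of_mem x hy))]

theorem map_step_single (K s : Int) (h1 : 1 ≤ s) (hsK : s ≤ K) :
    (PySem.List.pyRange 1 (K+1) 1).map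
      (fun i => if PySem.Set.contains (PySem.Set.add PySem.Set.empty s) i then -i else i)
    = PySem.List.pyRange 1 s 1 ++ [-s] ++ PySem.List.pyRange (s+1) (K+1) 1 := by
  have hsplit : PySem.List.pyRange 1 (K+1) 1
      = (PySem.List.pyRange 1 s 1 ++ PySem.List.pyRange s (s+1) 1) ++ PySem.List.pyRange (s+1) (K+1) 1 := by
    rw [List.append_assoc, ← PySem.List.pyRange_one_append s (s+1) (K+1) (by omega) (by omega),
        ← PySem.List.pyRange_one_append 1 s (K+1) (by omega) (by omega)]
  rw [hsplit]
  simp only [List.map_append]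
  congr 1
  · congr 1
    · apply map_step_of_no_flip
      intro x hx hc
      rw [contains_single] at hc
      have := PySem.List.mem_pyRange_one.mp hx
      omega
    · rw [PySem.List.pyRange_one_singleton]
      simp only [List.map_cons, List.map_nil]
      rw [if_pos ((contains_single s s).mpr rfl)]
  · apply map_step_of_no_flip
    intro x hx hc
    rw [contains_single] at hc
    have := PySem.List.mem_pyRange_one.mp hx
    omega


theorem jump_path_main : ∀ (n : Int), Dom_jump_path n → ¬ D_jump_path n →
    jump_path n = jump_path_alt n := by
  intro n hdom hD
  simp only [jump_path, jump_path_alt]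
  set m : Int := if n < 0 then -n else n with hm
  have hm0 : 0 ≤ m := by rw [hm]; split <;> omega
  have hmabs : m.toNat = n.natAbs := by rw [hm]; split <;> omega
  have hm31 : m ≤ 2147483648 := by
    unfold Dom_jump_path pvDomInt at hdom
    simp only [decide_eq_true_eq] at hdom
    rw [hm]; split <;> omega
  obtain ⟨K, hKrun, hKgood, hKmin, -⟩ := loop_result m hm0
  have hA : jumpLoopA m (m.toNat + 3) 0 0 = ((K:Int), Tri (K:Int)) := by
    have h0 : jumpLoopA m (m.toNat+3) 0 0 = jumpLoopA m (m.toNat+3) 0 (Tri 0) := by norm_num [Tri]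
    rw [h0, loopAB m _ 0, hKrun]
  obtain ⟨hs2, hs0⟩ := s_spec m K hKgood
  rw [hA, hKrun]
  have hTri : PySem.Int.floordiv ((K:Int) * ((K:Int) + 1)) 2 = Tri (K:Int) := rfl
  rw [hTri]
  set s : Int := PySem.Int.floordiv (Tri (K:Int) - m) 2 with hsdef
  have hbad := bad_iff m hm0 hm31 K hKgood hKmin
  have hsK : s ≤ (K:Int) := by
    by_contra hgt
    rw [not_le] at hgt
    apply hD
    unfold D_jump_path
    rw [← hmabs]
    rw [hsdef] at hgt
    exact hbad.mpr hgt
  have hflips : (List.foldl (fun (st : PySem.Set Int × Int) i =>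
        if i ≤ st.2 then (st.1.add i, st.2 - i) else st)
        (PySem.Set.empty, s) (PySem.List.pyRange (K:Int) 0 (-1))).1
      = if s = 0 then PySem.Set.empty else PySem.Set.add PySem.Set.empty s := by
    rw [greedy_fold K PySem.Set.empty s hs0 hsK]
  rw [hflips]
  have hKpos : (0:Int) < (K:Int) + 1 := by positivity
  by_cases hTm : Tri (K:Int) = m
  · -- total == n: s = 0, no flip
    have hs00 : s = 0 := by omega
    rw [if_pos hTm, hs00, if_pos rfl]
    rw [PySem.List.pyRange_one_cons hKpos]
    show make_path (0 :: PySem.List.pyRange (0+1) ((K:Int)+1) 1) (decide (n < 0)) = _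
    simp only [make_path]
    have hmap : PySem.List.pyRange (0+1) ((K:Int)+1) 1
        = (PySem.List.pyRange (0+1) ((K:Int)+1) 1).map
            (fun i => if PySem.Set.contains PySem.Set.empty i then -i else i) := by
      rw [map_step_of_no_flip _ _ (fun x _ => by rw [contains_empty]; simp)]
    rw [hmap, couple PySem.Set.empty]
    norm_num
  · -- total != n: single flip at s
    have hs1 : 1 ≤ s := by
      have := hKgood.1
      omega
    rw [if_neg hTm, nums_splice (K:Int) s hs1 hsK,
        if_neg (by omega : ¬ s = 0)]
    rw [show PySem.List.pyRange 0 s 1 = 0 :: PySem.List.pyRange 1 s 1 from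
          by rw [PySem.List.pyRange_one_cons (by omega)]; norm_num]
    show make_path (0 :: (PySem.List.pyRange 1 s 1 ++ [-s] ++ PySem.List.pyRange (s+1) ((K:Int)+1) 1))
          (decide (n < 0)) = _
    simp only [make_path]
    rw [show PySem.List.pyRange 1 s 1 ++ [-s] ++ PySem.List.pyRange (s+1) ((K:Int)+1) 1
          = (PySem.List.pyRange 1 ((K:Int)+1) 1).map
              (fun i => if PySem.Set.contains (PySem.Set.add PySem.Set.empty s) i then -i else i) from
          (map_step_single (K:Int) s hs1 hsK).symm]
    rw [couple (PySem.Set.add PySem.Set.empty s)]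
    norm_num


theorem len_fold_make : ∀ (xs : List Int) (acc : List Int),
    (xs.foldl (fun acc i => (acc.headD 0 + i) :: acc) acc).length = acc.length + xs.length := by
  intro xs
  induction xs with
  | nil => intro acc; simp
  | cons x xs ih =>
    intro acc
    rw [List.foldl_cons, ih]
    simp only [List.length_cons]
    omega

theorem len_make_path (x : Int) (rest : List Int) (b : Bool) :
    (make_path (x :: rest) b).length = rest.length + 1 := by
  have h := len_fold_make rest [x]
  simp only [make_path]
  cases b
  · simp only [Bool.false_eq_true, if_false, List.length_reverse]
    rw [h]; simp [Nat.add_comm]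
  · simp only [if_true, List.length_map, List.length_reverse]
    rw [h]; simp [Nat.add_comm]

theorem len_fold_alt2 (C : Int → Prop) [DecidablePred C] : ∀ (ys : List Int) (st : List Int × Int),
    ((ys.foldl (fun (st : List Int × Int) i =>
        ((if C i then st.2 - i else st.2 + i) :: st.1,
         if C i then st.2 - i else st.2 + i)) st).1).length = st.1.length + ys.length := by
  intro ys
  induction ys with
  | nil => intro st; simp
  | cons y ys ih =>
    intro st
    rw [List.foldl_cons, ih]
    simp only [List.length_cons]
    omega

theorem jump_path_tight_aux : ∀ (n : Int), Dom_jump_path n → D_jump_path n →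
    jump_path n ≠ jump_path_alt n := by
  intro n hdom hDn
  simp only [jump_path, jump_path_alt]
  set m : Int := if n < 0 then -n else n with hm
  have hm0 : 0 ≤ m := by rw [hm]; split <;> omega
  have hmabs : m.toNat = n.natAbs := by rw [hm]; split <;> omega
  obtain ⟨K, hKrun, hKgood, hKmin, -⟩ := loop_result m hm0
  have hA : jumpLoopA m (m.toNat + 3) 0 0 = ((K:Int), Tri (K:Int)) := by
    have h0 : jumpLoopA m (m.toNat+3) 0 0 = jumpLoopA m (m.toNat+3) 0 (Tri 0) := by norm_num [Tri]
    rw [h0, loopAB m _ 0, hKrun]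
  obtain ⟨hs2, hs0⟩ := s_spec m K hKgood
  rw [hA, hKrun]
  have hTri : PySem.Int.floordiv ((K:Int) * ((K:Int) + 1)) 2 = Tri (K:Int) := rfl
  rw [hTri]
  set s : Int := PySem.Int.floordiv (Tri (K:Int) - m) 2 with hsdef
  have hm31 : m ≤ 2147483648 := by
    unfold Dom_jump_path pvDomInt at hdom
    simp only [decide_eq_true_eq] at hdom
    rw [hm]; split <;> omega
  have hbad := bad_iff m hm0 hm31 K hKgood hKmin
  have hsgt : (K:Int) < s := by
    rw [hsdef]
    apply hbad.mp
    unfold D_jump_path at hDn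
    rw [← hmabs] at hDn
    exact hDn
  have hTm : ¬ (Tri (K:Int) = m) := by omega
  rw [if_neg hTm]
  -- lengths: A has K+2 elements, B has K+1
  have hlenrange : (PySem.List.pyRange 0 ((K:Int)+1) 1).length = K + 1 := by
    rw [PySem.List.length_pyRange_one]; omega
  have htake : (PySem.List.slice (PySem.List.pyRange 0 ((K:Int)+1) 1) none (some s)).length = K + 1 := by
    rw [PySem.List.slice_to _ (by omega), List.length_take, hlenrange]
    omega
  have hdrop : (PySem.List.slice (PySem.List.pyRange 0 ((K:Int)+1) 1) (some (s+1)) none).length = 0 := by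
    rw [PySem.List.slice_from _ (by omega), List.length_drop, hlenrange]
    omega
  rcases hsl : PySem.List.slice (PySem.List.pyRange 0 ((K:Int)+1) 1) none (some s) with _ | ⟨x, l⟩
  · rw [hsl] at htake
    simp only [List.length_nil] at htake
    omega
  · intro heq
    have hlen := congrArg List.length heq
    have hllen : l.length = K := by
      rw [hsl] at htake
      simp only [List.length_cons] at htake
      omega
    have hrestlen : ((l ++ [-s]) ++
        PySem.List.slice (PySem.List.pyRange 0 ((K:Int)+1) 1) (some (s+1)) none).length = K + 1 := by
      simp only [List.length_append, hllen, hdrop, List.length_cons, List.length_nil]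
    rw [List.cons_append, List.cons_append, len_make_path, hrestlen] at hlen
    revert hlen
    split <;> intro hlen
    · simp only [List.length_map, List.length_reverse] at hlen
      rw [len_fold_alt2] at hlen
      simp only [List.length_cons, List.length_nil, PySem.List.length_pyRange_one] at hlen
      omega
    · simp only [List.length_reverse] at hlen
      rw [len_fold_alt2] at hlen
      simp only [List.length_cons, List.length_nil, PySem.List.length_pyRange_one] at hlen
      omega

-- ===== VERDICT (by name: the statement is the Claim_ definition above) =====
theorem jump_path_spec : Claim_unchanged_jump_path := by
  intro n hdom hD
  exact jump_path_main n hdom hD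

theorem jump_path_changed : Claim_changed_jump_path := by
  unfold Claim_changed_jump_path
  exact ⟨by decide, ⟨5, by decide, by decide, by decide, by decide, by decide, by decide⟩,
         by decide, by decide, by decide⟩

theorem jump_path_tight : Claim_exact_jump_path := by
  intro n hdom hD
  exact jump_path_tight_aux n hdom hD
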